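-- pv_equiv track=rewrite | github.com/PaarthIyer/AoC2025 | day6/problem2.py | ceph_nums
-- ===== SOURCE A (Python) =====
-- def ceph_nums(nums: str) -> list[list[int]]:
--     ceph = []
--     run = []
--
--     for i in range(len(nums[0])):
--         str_num = "".join([line[i] for line in nums]).strip()
--         if str_num == "":
--             ceph.append(run)
--             run = []
--         else:
--             run.append(int(str_num))
--     ceph.append(run)
--     return ceph
-- ===== SOURCE B (Python) =====
-- def ceph_nums(nums: str) -> list[list[int]]:
--     w = len(nums[0])
--     cols = ["".join(line[i] for line in nums).strip() for i in range(w)]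
--     bounds = [-1] + [i for i, c in enumerate(cols) if c == ""] + [w]
--     return [[int(c) for c in cols[b + 1:e]] for b, e in zip(bounds, bounds[1:])]
-- ===== Notes on version B (the rewrite author's own statement) =====
-- stated objective: alternative
-- what changed: A builds groups with an inline flush accumulator while scanning columns; B first materialises the list of column strings, computes the blank-column indices, and produces each group by slicing between consecutive boundary indices.
import Mathlib
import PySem

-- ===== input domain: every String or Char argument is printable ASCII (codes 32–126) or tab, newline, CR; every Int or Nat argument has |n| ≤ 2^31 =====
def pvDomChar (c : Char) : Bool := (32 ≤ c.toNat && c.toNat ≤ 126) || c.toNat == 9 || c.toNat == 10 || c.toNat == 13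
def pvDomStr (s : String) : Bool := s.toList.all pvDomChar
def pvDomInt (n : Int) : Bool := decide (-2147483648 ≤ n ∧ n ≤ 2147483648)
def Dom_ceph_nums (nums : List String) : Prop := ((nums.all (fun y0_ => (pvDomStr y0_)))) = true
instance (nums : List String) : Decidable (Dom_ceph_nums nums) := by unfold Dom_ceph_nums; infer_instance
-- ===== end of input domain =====

-- B replaces A's inline flush accumulator by a boundaries-and-slices decomposition (objective: alternative, same cost).

-- shared column extractor: "".join([line[i] for line in nums]).strip()  (as a Char list)
def pvCol (nums : List String) (i : Int) : List Char :=
  PySem.Chars.strip (nums.map (fun line => (PySem.Str.pyGet? line i).getD ' '))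

-- ===== PORT A =====
def ceph_nums (nums : List String) : List (List Int) :=
  let w : Int := PySem.Str.len (nums.head?.getD "")
  let st := (PySem.List.pyRange 0 w 1).foldl
    (fun (st : List (List Int) × List Int) i =>
      let s := pvCol nums i
      if s = [] then (st.1 ++ [st.2], ([] : List Int))
      else (st.1, st.2 ++ [(PySem.Int.ofChars? s).getD 0]))
    ([], [])
  st.1 ++ [st.2]

-- ===== PORT B =====
def ceph_nums_alt (nums : List String) : List (List Int) :=
  let w : Int := PySem.Str.len (nums.head?.getD "")
  let cols := (PySem.List.pyRange 0 w 1).map (pvCol nums)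
  let bounds : List Int :=
    [-1] ++ ((PySem.List.enumerate cols 0).filter (fun p => decide (p.2 = []))).map (·.1) ++ [w]
  (bounds.zip bounds.tail).map (fun be =>
    (PySem.List.slice cols (some (be.1 + 1)) (some be.2)).map (fun c => (PySem.Int.ofChars? c).getD 0))

-- ===== PRECONDITION & SPEC =====
-- Pre_ excludes exactly the inputs on which Python A raises: the empty list (IndexError on nums[0]),
-- a line shorter than nums[0] (IndexError on line[i]), and a non-blank column whose stripped string
-- is not a valid int literal (ValueError).  B raises on exactly the same inputs.
def Pre_ceph_nums (nums : List String) : Prop :=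
  nums ≠ [] ∧
  (∀ line ∈ nums, (nums.head?.getD "").toList.length ≤ line.toList.length) ∧
  (∀ i < (nums.head?.getD "").toList.length,
     pvCol nums (i : Int) = [] ∨ (PySem.Int.ofChars? (pvCol nums (i : Int))).isSome = true)
instance (nums : List String) : Decidable (Pre_ceph_nums nums) := by unfold Pre_ceph_nums; infer_instance

def pvWitness_ceph_nums : List String := ["12 3", "45 6"]

def Spec_ceph_nums (nums : List String) (out : List (List Int)) : Prop := out = ceph_nums_alt nums
instance (nums : List String) (out : List (List Int)) : Decidable (Spec_ceph_nums nums out) := by unfold Spec_ceph_nums; infer_instance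

-- ===== CLAIM (what is proved, stated in full; the proofs are below) =====
def Claim_equal_ceph_nums : Prop := ∀ (nums : List String), Dom_ceph_nums nums → Pre_ceph_nums nums → Spec_ceph_nums nums (ceph_nums nums)

-- ===== LEMMAS AND PROOFS =====

-- A's loop body as a function of the column string
def stepA (st : List (List Int) × List Int) (c : List Char) : List (List Int) × List Int :=
  if c = [] then (st.1 ++ [st.2], ([] : List Int))
  else (st.1, st.2 ++ [(PySem.Int.ofChars? c).getD 0])

-- canonical recursive split-on-blank, the pivot both ports are reduced to
def splitC : List (List Char) → List (List Int)
  | [] => [[]]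
  | c :: cs =>
    if c = [] then [] :: splitC cs
    else
      match splitC cs with
      | g :: gs => (((PySem.Int.ofChars? c).getD 0) :: g) :: gs
      | [] => []

theorem splitC_ne_nil (cs : List (List Char)) : splitC cs ≠ [] := by
  induction cs with
  | nil => simp [splitC]
  | cons c cs ih =>
    simp only [splitC]
    split
    · simp
    · cases h : splitC cs with
      | nil => exact absurd h ih
      | cons g gs => simp

theorem foldA (cs : List (List Char)) (acc : List (List Int)) (run : List Int) :
    (cs.foldl stepA (acc, run)).1 ++ [(cs.foldl stepA (acc, run)).2] =
      acc ++ (match splitC cs with | [] => [] | g :: gs => (run ++ g) :: gs) := by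
  induction cs generalizing acc run with
  | nil => simp [splitC]
  | cons c cs ih =>
    simp only [List.foldl_cons, stepA]
    obtain ⟨g, gs, hg⟩ : ∃ g gs, splitC cs = g :: gs := by
      cases h : splitC cs with
      | nil => exact absurd h (splitC_ne_nil cs)
      | cons g gs => exact ⟨g, gs, rfl⟩
    by_cases hc : c = []
    · simp only [hc]
      rw [ih]
      simp [splitC, hg]
    · simp only [if_neg hc]
      rw [ih]
      simp only [splitC, if_neg hc, hg]
      simp

-- blank-column indices with a running offset
def blankIdx : List (List Char) → Int → List Int
  | [], _ => []
  | c :: cs, s => if c = [] then s :: blankIdx cs (s + 1) else blankIdx cs (s + 1)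

theorem enum_filter_eq (cs : List (List Char)) (s : Int) :
    ((PySem.List.enumerate cs s).filter (fun p => decide (p.2 = []))).map (·.1) = blankIdx cs s := by
  induction cs generalizing s with
  | nil => simp [PySem.List.enumerate_nil, blankIdx]
  | cons c cs ih =>
    rw [PySem.List.enumerate_cons]
    by_cases hc : c = [] <;> simp [blankIdx, hc, ih]

theorem blankIdx_shift (cs : List (List Char)) (s : Int) :
    blankIdx cs (s + 1) = (blankIdx cs s).map (· + 1) := by
  induction cs generalizing s with
  | nil => simp [blankIdx]
  | cons c cs ih =>
    by_cases hc : c = [] <;> simp [blankIdx, hc, ih]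

theorem blankIdx_le (cs : List (List Char)) (s : Int) : ∀ x ∈ blankIdx cs s, s ≤ x := by
  induction cs generalizing s with
  | nil => simp [blankIdx]
  | cons c cs ih =>
    intro x hx
    simp only [blankIdx] at hx
    split at hx
    · rcases List.mem_cons.mp hx with h | h
      · omega
      · have := ih (s + 1) x h; omega
    · have := ih (s + 1) x hx; omega

theorem slice_cons_shift {α : Type} (c : α) (cs : List α) (a b : Int) (ha : 0 ≤ a) (hb : 0 ≤ b) :
    PySem.List.slice (c :: cs) (some (a + 1)) (some (b + 1)) = PySem.List.slice cs (some a) (some b) := by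
  rw [PySem.List.slice_toNat _ (by omega) (by omega), PySem.List.slice_toNat _ ha hb]
  have h1 : (a + 1).toNat = a.toNat + 1 := by omega
  have h2 : (b + 1).toNat - (a + 1).toNat = b.toNat - a.toNat := by omega
  rw [h2, h1, List.drop_succ_cons]

theorem zip_shift_slice (c : List Char) (cs : List (List Char)) (P Q : List Int)
    (hP : ∀ x ∈ P, -1 ≤ x) (hQ : ∀ x ∈ Q, 0 ≤ x) :
    ((P.map (· + 1)).zip (Q.map (· + 1))).map
      (fun be => (PySem.List.slice (c :: cs) (some (be.1 + 1)) (some be.2)).map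
        (fun s => (PySem.Int.ofChars? s).getD 0))
    = (P.zip Q).map
      (fun be => (PySem.List.slice cs (some (be.1 + 1)) (some be.2)).map
        (fun s => (PySem.Int.ofChars? s).getD 0)) := by
  rw [List.zip_map, List.map_map]
  apply List.map_congr_left
  intro ⟨a, b⟩ hab
  obtain ⟨ha, hb⟩ := List.of_mem_zip hab
  have ha' : -1 ≤ a := hP a ha
  have hb' : 0 ≤ b := hQ b hb
  simp only [Function.comp, Prod.map]
  rw [show a + 1 + 1 = (a + 1) + 1 by ring, slice_cons_shift c cs (a + 1) b (by omega) hb']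

theorem sliceSplit_eq (cs : List (List Char)) :
    (((-1) :: (blankIdx cs 0 ++ [(cs.length : Int)])).zip (blankIdx cs 0 ++ [(cs.length : Int)])).map
      (fun be => (PySem.List.slice cs (some (be.1 + 1)) (some be.2)).map
        (fun s => (PySem.Int.ofChars? s).getD 0))
    = splitC cs := by
  induction cs with
  | nil => decide
  | cons c cs ih =>
    have hM0 : ∀ x ∈ blankIdx cs 0 ++ [(cs.length : Int)], 0 ≤ x := by
      intro x hx
      rcases List.mem_append.mp hx with h | h
      · exact blankIdx_le cs 0 x h
      · simp at h; omega
    have hM1 : ∀ x ∈ (-1 : Int) :: (blankIdx cs 0 ++ [(cs.length : Int)]), -1 ≤ x := by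
      intro x hx
      rcases List.mem_cons.mp hx with h | h
      · omega
      · have := hM0 x h; omega
    have hlen : ((c :: cs).length : Int) = (cs.length : Int) + 1 := by push_cast [List.length_cons]; ring
    by_cases hc : c = []
    · -- blank first column
      have hsh : blankIdx cs 1 = (blankIdx cs 0).map (· + 1) := by
        have h := blankIdx_shift cs 0; norm_num at h; exact h
      have hB : blankIdx (c :: cs) 0 = 0 :: (blankIdx cs 0).map (· + 1) := by
        simp [blankIdx, hc, hsh]
      rw [hB, hlen]
      have hMap : (blankIdx cs 0).map (· + 1) ++ [(cs.length : Int) + 1] =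
          ((blankIdx cs 0 ++ [(cs.length : Int)]).map (· + 1)) := by simp
      have hzip :
          (((-1) :: (0 :: (blankIdx cs 0).map (· + 1) ++ [(cs.length : Int) + 1])).zip
            (0 :: (blankIdx cs 0).map (· + 1) ++ [(cs.length : Int) + 1]))
          = ((-1 : Int), (0 : Int)) ::
            ((((-1) :: (blankIdx cs 0 ++ [(cs.length : Int)])).map (· + 1)).zip
              ((blankIdx cs 0 ++ [(cs.length : Int)]).map (· + 1))) := by
        simp only [List.map_cons]
        norm_num [List.zip_cons_cons]

      rw [hzip, List.map_cons,
        zip_shift_slice c cs _ _ hM1 hM0, ih]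
      have hfirst : (PySem.List.slice (c :: cs) (some ((-1 : Int) + 1)) (some (0 : Int))).map
          (fun s => (PySem.Int.ofChars? s).getD 0) = [] := by
        norm_num [PySem.List.slice_toNat _ (by omega : (0:Int) ≤ 0) (by omega : (0:Int) ≤ 0)]
      rw [hfirst]
      simp [splitC, hc]
    · -- non-blank first column
      have hsh : blankIdx cs 1 = (blankIdx cs 0).map (· + 1) := by
        have h := blankIdx_shift cs 0; norm_num at h; exact h
      have hB : blankIdx (c :: cs) 0 = (blankIdx cs 0).map (· + 1) := by
        simp [blankIdx, hc, hsh]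
      rw [hB, hlen]
      obtain ⟨m, R, hMR⟩ : ∃ m R, blankIdx cs 0 ++ [(cs.length : Int)] = m :: R := by
        cases h : blankIdx cs 0 ++ [(cs.length : Int)] with
        | nil => simp at h
        | cons m R => exact ⟨m, R, rfl⟩
      have hm0 : 0 ≤ m := hM0 m (by rw [hMR]; exact List.mem_cons_self)
      have hR0 : ∀ x ∈ R, 0 ≤ x := fun x hx => hM0 x (by rw [hMR]; exact List.mem_cons_of_mem _ hx)
      have hMap : (blankIdx cs 0).map (· + 1) ++ [(cs.length : Int) + 1] =
          (m + 1) :: R.map (· + 1) := by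
        have : (blankIdx cs 0).map (· + 1) ++ [(cs.length : Int) + 1] =
            ((blankIdx cs 0 ++ [(cs.length : Int)]).map (· + 1)) := by simp
        rw [this, hMR]; simp
      rw [hMap]
      have hzip :
          (((-1 : Int) :: ((m + 1) :: R.map (· + 1))).zip ((m + 1) :: R.map (· + 1)))
          = ((-1 : Int), m + 1) :: (((m :: R).map (· + 1)).zip (R.map (· + 1))) := by
        simp [List.zip_cons_cons]
      rw [hzip, List.map_cons,
        zip_shift_slice c cs (m :: R) R
          (fun x hx => by rcases List.mem_cons.mp hx with h | h
                          · omega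
                          · have := hR0 x h; omega) hR0]
      -- the IH, with its zip unfolded the same way
      have hzip' : (((-1 : Int) :: (m :: R)).zip (m :: R)) = ((-1 : Int), m) :: ((m :: R).zip R) := by
        simp [List.zip_cons_cons]
      rw [hMR, hzip', List.map_cons] at ih
      have hfirst : (PySem.List.slice (c :: cs) (some ((-1 : Int) + 1)) (some (m + 1))).map
            (fun s => (PySem.Int.ofChars? s).getD 0)
          = ((PySem.Int.ofChars? c).getD 0) ::
            ((PySem.List.slice cs (some ((-1 : Int) + 1)) (some m)).map
              (fun s => (PySem.Int.ofChars? s).getD 0)) := by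
        norm_num [PySem.List.slice_toNat _ (by omega : (0:Int) ≤ 0) (by omega : (0:Int) ≤ m + 1),
          PySem.List.slice_toNat _ (by omega : (0:Int) ≤ 0) hm0]
        rw [show (m + 1).toNat = m.toNat + 1 by omega]
        simp [List.take_succ_cons]
      rw [hfirst]
      simp only [splitC, if_neg hc, ← ih]

theorem cols_eq (nums : List String) :
    (PySem.List.pyRange 0 (PySem.Str.len (nums.head?.getD "")) 1).map (pvCol nums)
      = (List.range (nums.head?.getD "").toList.length).map (fun k : Nat => pvCol nums (k : Int)) := by
  rw [PySem.Str.len_eq, PySem.List.pyRange_one, List.map_map]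
  simp only [sub_zero, Int.toNat_natCast, String.length_toList]
  apply List.map_congr_left
  intro k _
  simp [Function.comp]

theorem ceph_nums_eq_splitC (nums : List String) :
    ceph_nums nums =
      splitC ((List.range (nums.head?.getD "").toList.length).map (fun k : Nat => pvCol nums (k : Int))) := by
  have h1 : ceph_nums nums =
      (((PySem.List.pyRange 0 (PySem.Str.len (nums.head?.getD "")) 1).foldl
          (fun st i => stepA st (pvCol nums i)) ([], [])).1 ++
        [((PySem.List.pyRange 0 (PySem.Str.len (nums.head?.getD "")) 1).foldl
          (fun st i => stepA st (pvCol nums i)) ([], [])).2]) := rfl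
  rw [h1, ← List.foldl_map, cols_eq, foldA]
  obtain ⟨g, gs, hg⟩ : ∃ g gs,
      splitC ((List.range (nums.head?.getD "").toList.length).map
        (fun k : Nat => pvCol nums (k : Int))) = g :: gs := by
    cases h : splitC ((List.range (nums.head?.getD "").toList.length).map
        (fun k : Nat => pvCol nums (k : Int))) with
    | nil => exact absurd h (splitC_ne_nil _)
    | cons g gs => exact ⟨g, gs, rfl⟩
  simp only [String.length_toList] at hg ⊢
  rw [hg]
  simp

theorem ceph_nums_alt_eq_splitC (nums : List String) :
    ceph_nums_alt nums =
      splitC ((List.range (nums.head?.getD "").toList.length).map (fun k : Nat => pvCol nums (k : Int))) := by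
  have hlen : PySem.Str.len (nums.head?.getD "") =
      ((((List.range (nums.head?.getD "").toList.length).map
          (fun k : Nat => pvCol nums (k : Int))).length : Int)) := by
    rw [PySem.Str.len_eq]; simp
  unfold ceph_nums_alt
  simp only [cols_eq, enum_filter_eq]
  rw [hlen]
  set cols := (List.range (nums.head?.getD "").toList.length).map (fun k : Nat => pvCol nums (k : Int)) with hcols
  rw [show [-1] ++ blankIdx cols 0 ++ [(cols.length : Int)] =
      (-1) :: (blankIdx cols 0 ++ [(cols.length : Int)]) by simp]
  rw [show ((-1 : Int) :: (blankIdx cols 0 ++ [(cols.length : Int)])).tail =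
      (blankIdx cols 0 ++ [(cols.length : Int)]) from rfl]
  exact sliceSplit_eq cols

theorem ceph_nums_spec : Claim_equal_ceph_nums := by
  intro nums _ _
  unfold Spec_ceph_nums
  rw [ceph_nums_eq_splitC, ceph_nums_alt_eq_splitC]
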